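-- pv_equiv track=rewrite | github.com/htang7415/Max-Handbook | modules/databases/streaming/connectors-and-pipeline-shapes/python/connectors_and_pipeline_shapes.py | validate_pipeline
-- ===== SOURCE A (Python) =====
-- def validate_pipeline(
--     stages: dict[str, str],
--     edges: list[tuple[str, str]],
-- ) -> bool:
--     inbound = {name: 0 for name in stages}
--     outbound = {name: 0 for name in stages}
--
--     for left, right in edges:
--         if left not in stages or right not in stages:
--             return False
--         inbound[right] += 1
--         outbound[left] += 1
--
--     for name, kind in stages.items():
--         if kind == "source" and inbound[name] != 0:
--             return False
--         if kind == "sink" and outbound[name] != 0: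
--             return False
--     return True
-- ===== SOURCE B (Python) =====
-- def validate_pipeline(
--     stages: dict[str, str],
--     edges: list[tuple[str, str]],
-- ) -> bool:
--     # Single pass over edges: an edge is a violation iff it touches an unknown
--     # stage, points into a source, or leaves a sink. No counting needed.
--     for left, right in edges:
--         if left not in stages or right not in stages:
--             return False
--         if stages[right] == "source" or stages[left] == "sink":
--             return False
--     return True
-- ===== Notes on version B (the rewrite author's own statement) =====
-- stated objective: simpler
-- what changed: B drops both degree-count dictionaries and the whole second pass over stages: a single pass over edges rejects any edge with an unknown endpoint, an edge into a source, or an edge out of a sink, since A's counts only ever feed a nonzero test.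
import Mathlib
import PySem

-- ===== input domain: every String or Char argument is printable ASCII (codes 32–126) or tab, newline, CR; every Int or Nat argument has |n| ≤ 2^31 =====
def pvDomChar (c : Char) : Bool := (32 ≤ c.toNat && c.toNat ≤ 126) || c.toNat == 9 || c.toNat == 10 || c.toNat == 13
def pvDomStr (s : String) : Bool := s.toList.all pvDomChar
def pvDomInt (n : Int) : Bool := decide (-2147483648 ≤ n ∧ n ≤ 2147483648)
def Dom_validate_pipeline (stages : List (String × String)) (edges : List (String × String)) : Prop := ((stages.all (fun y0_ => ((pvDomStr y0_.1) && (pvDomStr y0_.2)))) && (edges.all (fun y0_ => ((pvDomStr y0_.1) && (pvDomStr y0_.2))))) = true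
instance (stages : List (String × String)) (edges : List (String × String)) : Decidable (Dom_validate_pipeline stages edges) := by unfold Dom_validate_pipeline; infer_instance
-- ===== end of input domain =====

-- B replaces A's degree-count dictionaries and second pass over stages by a single pass over edges (simpler).


-- ===== PORT A =====
-- A's edge loop: checks both endpoints are stages, then increments the two counters.
-- The increments and the second loop's inbound[name]/outbound[name] never raise in Python
-- (the membership test in the same iteration precedes the increments, and the counter dicts
-- carry exactly the stage keys), so modify/getD are exact here and A is total.
def pvLoopA (st : PySem.Dict String String) (inb outb : PySem.Dict String Int) :
    List (String × String) → Option (PySem.Dict String Int × PySem.Dict String Int)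
  | [] => some (inb, outb)
  | (l, r) :: rest =>
      if !(st.contains l) || !(st.contains r) then none
      else pvLoopA st (inb.modify r 0 (· + 1)) (outb.modify l 0 (· + 1)) rest

-- A's second loop over stages.items()
def pvCheckA (inb outb : PySem.Dict String Int) : List (String × String) → Bool
  | [] => true
  | (name, kind) :: rest =>
      if kind == "source" && !(inb.getD name 0 == 0) then false
      else if kind == "sink" && !(outb.getD name 0 == 0) then false
      else pvCheckA inb outb rest

def validate_pipeline (stages : List (String × String)) (edges : List (String × String)) : Bool :=
  let st := PySem.Dict.ofList stages
  let inbound := st.keys.foldl (fun d n => d.insert n (0 : Int)) PySem.Dict.empty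
  let outbound := st.keys.foldl (fun d n => d.insert n (0 : Int)) PySem.Dict.empty
  match pvLoopA st inbound outbound edges with
  | none => false
  | some (inb, outb) => pvCheckA inb outb st.items

-- ===== PORT B =====
-- stages[right] / stages[left] are ported as getD with a dummy default: the membership
-- test earlier in the same iteration guarantees the key is present, so this is exact.
def pvLoopB (st : PySem.Dict String String) : List (String × String) → Bool
  | [] => true
  | (l, r) :: rest =>
      if !(st.contains l) || !(st.contains r) then false
      else if st.getD r "" == "source" || st.getD l "" == "sink" then false
      else pvLoopB st rest

def validate_pipeline_alt (stages : List (String × String)) (edges : List (String × String)) : Bool :=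
  pvLoopB (PySem.Dict.ofList stages) edges

-- ===== PRECONDITION & SPEC =====
def Spec_validate_pipeline (stages : List (String × String)) (edges : List (String × String)) (out : Bool) : Prop := out = validate_pipeline_alt stages edges
instance (stages : List (String × String)) (edges : List (String × String)) (out : Bool) : Decidable (Spec_validate_pipeline stages edges out) := by unfold Spec_validate_pipeline; infer_instance

-- ===== CLAIM (what is proved, stated in full; the proofs are below) =====
def Claim_equal_validate_pipeline : Prop := ∀ (stages : List (String × String)) (edges : List (String × String)), Dom_validate_pipeline stages edges → Spec_validate_pipeline stages edges (validate_pipeline stages edges)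

-- ===== LEMMAS AND PROOFS =====

theorem pv_getD_init (keys : List String) (n : String) :
    (keys.foldl (fun d k => d.insert k (0 : Int)) PySem.Dict.empty).getD n 0 = 0 := by
  suffices h : ∀ d : PySem.Dict String Int, (∀ m, d.getD m 0 = 0) →
      (keys.foldl (fun d k => d.insert k (0 : Int)) d).getD n 0 = 0 by
    exact h _ (fun m => PySem.Dict.getD_empty m 0)
  induction keys with
  | nil => intro d hd; simpa using hd n
  | cons k ks ih =>
      intro d hd
      refine ih _ (fun m => ?_)
      rw [PySem.Dict.getD_insert]
      split <;> simp [hd]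

theorem pvLoopA_bad (st : PySem.Dict String String) (inb outb : PySem.Dict String Int)
    (edges : List (String × String))
    (h : edges.all (fun e => st.contains e.1 && st.contains e.2) = false) :
    pvLoopA st inb outb edges = none := by
  induction edges generalizing inb outb with
  | nil => simp at h
  | cons e rest ih =>
      obtain ⟨l, r⟩ := e
      simp only [pvLoopA]
      cases hl : st.contains l <;> cases hr : st.contains r <;>
        simp_all [List.all_cons]
      obtain ⟨a, b, hm, hi⟩ := h
      exact ih _ _ a b hm hi

theorem pvLoopA_good (st : PySem.Dict String String) (inb outb : PySem.Dict String Int)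
    (edges : List (String × String))
    (h : edges.all (fun e => st.contains e.1 && st.contains e.2) = true) :
    pvLoopA st inb outb edges =
      some (edges.foldl (fun d e => d.modify e.2 0 (· + 1)) inb,
            edges.foldl (fun d e => d.modify e.1 0 (· + 1)) outb) := by
  induction edges generalizing inb outb with
  | nil => rfl
  | cons e rest ih =>
      obtain ⟨l, r⟩ := e
      simp only [List.all_cons, Bool.and_eq_true] at h
      simp only [pvLoopA, List.foldl_cons]
      rw [if_neg (by simp [h.1.1, h.1.2])]
      exact ih _ _ h.2

theorem pvCheckA_eq (inb outb : PySem.Dict String Int) (items : List (String × String)) :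
    pvCheckA inb outb items =
      !(items.any (fun p => (p.2 == "source" && !(inb.getD p.1 0 == 0)) ||
                            (p.2 == "sink" && !(outb.getD p.1 0 == 0)))) := by
  induction items with
  | nil => rfl
  | cons p rest ih =>
      obtain ⟨name, kind⟩ := p
      simp only [pvCheckA, List.any_cons]
      cases h1 : (kind == "source") <;> cases h2 : (kind == "sink") <;>
        cases h3 : (inb.getD name 0 == 0) <;> cases h4 : (outb.getD name 0 == 0) <;>
        simp [h1, h2, h3, h4, ih]

theorem pvLoopB_eq (st : PySem.Dict String String) (edges : List (String × String)) :
    pvLoopB st edges =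
      edges.all (fun e => st.contains e.1 && st.contains e.2 &&
                          !(st.getD e.2 "" == "source") && !(st.getD e.1 "" == "sink")) := by
  induction edges with
  | nil => rfl
  | cons e rest ih =>
      obtain ⟨l, r⟩ := e
      simp only [pvLoopB, List.all_cons]
      cases hl : st.contains l <;> cases hr : st.contains r <;>
        cases hs1 : (st.getD r "" == "source") <;> cases hs2 : (st.getD l "" == "sink") <;>
        simp [hl, hr, hs1, hs2, ih]

theorem pv_main (stages edges : List (String × String)) :
    validate_pipeline stages edges = validate_pipeline_alt stages edges := by
  simp only [validate_pipeline, validate_pipeline_alt, pvLoopB_eq]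
  set st := PySem.Dict.ofList stages with hst
  cases hall : edges.all (fun e => st.contains e.1 && st.contains e.2) with
  | false =>
      rw [pvLoopA_bad _ _ _ _ hall]
      symm
      simp only [List.all_eq_false] at hall ⊢
      obtain ⟨e, he, hbad⟩ := hall
      exact ⟨e, he, fun hc => hbad (by simp only [Bool.and_eq_true] at hc; exact (by simp [hc.1.1.1, hc.1.1.2]))⟩
  | true =>
      rw [pvLoopA_good _ _ _ _ hall]
      simp only
      rw [pvCheckA_eq]
      have hcount2 : ∀ n : String,
          ((edges.foldl (fun d e => d.modify e.2 0 (· + 1))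
              (st.keys.foldl (fun d n => d.insert n (0 : Int)) PySem.Dict.empty)).getD n 0)
          = ((edges.map Prod.snd).count n : Int) := by
        intro n
        rw [← List.foldl_map (f := Prod.snd) (g := fun d x => PySem.Dict.modify d x 0 (· + 1)), PySem.Dict.getD_foldl_modify_add_one, pv_getD_init]
        simp
      have hcount1 : ∀ n : String,
          ((edges.foldl (fun d e => d.modify e.1 0 (· + 1))
              (st.keys.foldl (fun d n => d.insert n (0 : Int)) PySem.Dict.empty)).getD n 0)
          = ((edges.map Prod.fst).count n : Int) := by
        intro n
        rw [← List.foldl_map (f := Prod.fst) (g := fun d x => PySem.Dict.modify d x 0 (· + 1)), PySem.Dict.getD_foldl_modify_add_one, pv_getD_init]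
        simp
      rw [Bool.eq_iff_iff]
      simp only [List.all_eq_true] at hall
      simp only [Bool.not_eq_true', List.any_eq_false, List.all_eq_true,
        Bool.and_eq_true, Bool.or_eq_true, beq_iff_eq, beq_eq_false_iff_ne,
        not_not, Nat.cast_eq_zero, List.count_eq_zero, not_or, not_and, hcount1, hcount2]
      have hv2 : ∀ k : String, st.contains k = true → st.get? k = some (st.getD k "") := by
        intro k hk
        have := PySem.Dict.contains_eq_isSome_get? st k
        rw [hk] at this
        obtain ⟨v, hv⟩ := Option.isSome_iff_exists.mp this.symm
        rw [PySem.Dict.getD_eq_get?_getD, hv]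
        exact hv ▸ rfl
      have hnd := PySem.Dict.nodup_keys_ofList stages
      rw [← hst] at hnd
      constructor
      · intro hI e he
        have hg := hall e he
        simp only [Bool.and_eq_true] at hg
        have hmem2 : e.2 ∈ edges.map Prod.snd := List.mem_map.mpr ⟨e, he, rfl⟩
        have hmem1 : e.1 ∈ edges.map Prod.fst := List.mem_map.mpr ⟨e, he, rfl⟩
        have hit2 : (e.2, st.getD e.2 "") ∈ st.items :=
          PySem.Dict.mem_items_of_get?_eq_some st (hv2 e.2 hg.2)
        have hit1 : (e.1, st.getD e.1 "") ∈ st.items :=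
          PySem.Dict.mem_items_of_get?_eq_some st (hv2 e.1 hg.1)
        refine ⟨⟨⟨hg.1, hg.2⟩, fun hsrc => ?_⟩, fun hsnk => ?_⟩
        · exact ((hI _ hit2).1 hsrc) hmem2
        · exact ((hI _ hit1).2 hsnk) hmem1
      · intro hB p hp
        have hpv : st.getD p.1 "" = p.2 := PySem.Dict.getD_of_mem_items st hp hnd ""
        constructor
        · intro hsrc hmem
          obtain ⟨e, he, hee⟩ := List.mem_map.mp hmem
          exact ((hB e he).1.2) (by rw [hee, hpv, hsrc])
        · intro hsnk hmem
          obtain ⟨e, he, hee⟩ := List.mem_map.mp hmem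
          exact ((hB e he).2) (by rw [hee, hpv, hsnk])

-- ===== VERDICT (by name: the statement is the Claim_ definition above) =====
theorem validate_pipeline_spec : Claim_equal_validate_pipeline := by
  intro stages edges _
  exact pv_main stages edges
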